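-- pv_equiv track=rewrite | github.com/zulu27/Ada_2026_Tareas | 3_Tarea/calculus.py | calculus
-- ===== SOURCE A (Python) =====
-- from collections import deque
--
-- def calculus(N,E):
--     ans = 0
--     menor = 0
--     mayor = len(N) - 1
--     n = 0
--     pros = 0
--     pila = deque()
--     #True es que inverti el estado
--     #False es que no inverti el estado
--
--     while pros <= len(N) - 1:
--         if n == 0 and E[n] == 'x':
--                 ans = N[mayor]
--                 mayor -= 1
--                 pros += 1
--
--         elif n == 0 and E[n] == '(':
--             pila.append(0)
--
--         elif len(pila) == 0 or pila[-1] == False: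
--
--             if E[n] == 'x' and E[n - 1] == '+':
--                 ans += N[mayor]
--                 mayor -= 1
--                 pros += 1
--
--             elif E[n] == 'x' and E[n-1] == '-':
--                 ans -= N[menor]
--                 menor += 1
--                 pros += 1
--
--             elif E[n] == 'x' and E[n-1] == '(':
--                 ans += N[mayor]
--                 mayor -= 1
--                 pros += 1
--
--             elif E[n] == '(' and E[n - 1] == '-':
--                 if len(pila) != 0:
--                     pila.append(not pila[-1])
--                 else:
--                     pila.append(True)
--
--
--             elif E[n] == '(' and E[n - 1] == '+':
--
--                 if len(pila) != 0:
--                     pila.append(pila[-1])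
--                 else:
--                     pila.append(False)
--
--             elif E[n] == '(' and E[n - 1] == '(':
--                 pila.append(pila[-1])
--
--             elif E[n] == ')':
--                 pila.pop()
--
--         else:
--                 if E[n] == 'x' and E[n - 1] == '+':
--                     ans -= N[menor]
--                     menor += 1
--                     pros += 1
--
--                 elif E[n] == 'x' and E[n-1] == '-':
--                     ans += N[mayor]
--                     mayor -= 1
--                     pros += 1
--
--                 elif E[n] == 'x' and E[n-1] == '(':
--                     ans -= N[menor]
--                     menor += 1
--                     pros += 1
--
--                 elif E[n] == '(' and E[n - 1] == '-':
--                     if len(pila) != 0: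
--                         pila.append(not pila[-1])
--                     else:
--                         pila.append(False)
--
--                 elif E[n] == '(' and E[n - 1] == '+':
--                     if len(pila) != 0:
--                         pila.append(pila[-1])
--                     else:
--                         pila.append(True)
--
--
--                 elif E[n] == '(' and E[n - 1] == '(':
--                     pila.append(pila[-1])
--
--                 elif E[n] == ')':
--                         pila.pop()
--         n += 1
--
--     return ans
-- ===== SOURCE B (Python) =====
-- def calculus(N, E):
--     pos = 0
--     neg = 0
--     pila = []
--     n = 0
--     while pos + neg < len(N):
--         c = E[n]
--         if c == 'x':
--             if n == 0:
--                 pos += 1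
--             else:
--                 prev = E[n - 1]
--                 if prev in ('+', '-', '('):
--                     top = len(pila) > 0 and pila[-1]
--                     if (prev == '-') != top:
--                         neg += 1
--                     else:
--                         pos += 1
--         elif c == '(':
--             if n == 0:
--                 pila.append(False)
--             else:
--                 prev = E[n - 1]
--                 if prev == '(':
--                     pila.append(pila[-1])
--                 elif prev in ('+', '-'):
--                     top = len(pila) > 0 and pila[-1]
--                     pila.append((prev == '-') != top)
--         elif c == ')':
--             pila.pop()
--         n += 1
--     return sum(N[len(N) - pos:]) - sum(N[:neg])
-- ===== Notes on version B (the rewrite author's own statement) =====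
-- stated objective: simpler
-- what changed: A's two mirrored 20-odd-line branch trees and three mutated accumulators (ans, menor, mayor) are replaced by one unified rule (an x counts negative iff prev=='-' XOR the stack top) maintaining just two counters, and the answer is produced at the end as a closed-form difference of end-slice sums sum(N[len(N)-pos:]) - sum(N[:neg]).
-- outside the precondition, e.g. on calculus([1, 2], ['(', 'x', ')', 'x', '+', 'x']): A returns 3, B returns 3
import Mathlib
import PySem

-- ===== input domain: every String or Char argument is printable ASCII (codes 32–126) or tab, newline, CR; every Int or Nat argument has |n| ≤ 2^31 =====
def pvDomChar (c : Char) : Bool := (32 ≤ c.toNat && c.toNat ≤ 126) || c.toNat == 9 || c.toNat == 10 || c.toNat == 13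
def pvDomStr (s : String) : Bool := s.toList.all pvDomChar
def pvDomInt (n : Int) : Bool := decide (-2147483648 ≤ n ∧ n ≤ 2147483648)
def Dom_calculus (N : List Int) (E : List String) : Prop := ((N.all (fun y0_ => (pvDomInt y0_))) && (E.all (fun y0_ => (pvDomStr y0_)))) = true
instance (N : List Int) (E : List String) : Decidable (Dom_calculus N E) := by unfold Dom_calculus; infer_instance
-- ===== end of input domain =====

-- B is SIMPLER, same cost: A's two mirrored branch trees collapse into one rule (sign = prev=='-' XOR stack top),
-- and A's three mutated accumulators (ans/menor/mayor) are replaced by two counters resolved by a closed-form sum at the end.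

-- E[n-1] as both Pythons read it (negative index wraps; only consulted when n ≠ 0, where it is in range)
def pvPrev (E : List String) (n : Nat) : String := (PySem.List.pyGet? E ((n : Int) - 1)).getD ""

-- ===== PORT A =====
-- A's while-loop; fuel = E.length + 1 bounds the iteration count (each step does n += 1 and the loop
-- reads E[n], so Python raises IndexError — the `none` bail below — once n reaches E.length).
def calculusGo (N : List Int) (E : List String) : Nat → Int → Int → Int → Int → List Bool → Nat → Int
  | 0, ans, _, _, _, _, _ => ans
  | fuel+1, ans, menor, mayor, pros, pila, n =>
    if pros ≤ (N.length : Int) - 1 then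
      match PySem.List.pyGet? E (n : Int) with
      | none => ans   -- E[n]: IndexError in Python (outside Pre_)
      | some c =>
        if n = 0 ∧ c = "x" then
          calculusGo N E fuel (PySem.List.pyGetD N mayor 0) menor (mayor - 1) (pros + 1) pila (n+1)
        else if n = 0 ∧ c = "(" then
          calculusGo N E fuel ans menor mayor pros (false :: pila) (n+1)
        else if pila = [] ∨ pila.headD false = false then
          if c = "x" ∧ pvPrev E n = "+" then
            calculusGo N E fuel (ans + PySem.List.pyGetD N mayor 0) menor (mayor - 1) (pros + 1) pila (n+1)
          else if c = "x" ∧ pvPrev E n = "-" then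
            calculusGo N E fuel (ans - PySem.List.pyGetD N menor 0) (menor + 1) mayor (pros + 1) pila (n+1)
          else if c = "x" ∧ pvPrev E n = "(" then
            calculusGo N E fuel (ans + PySem.List.pyGetD N mayor 0) menor (mayor - 1) (pros + 1) pila (n+1)
          else if c = "(" ∧ pvPrev E n = "-" then
            calculusGo N E fuel ans menor mayor pros ((if pila ≠ [] then !(pila.headD false) else true) :: pila) (n+1)
          else if c = "(" ∧ pvPrev E n = "+" then
            calculusGo N E fuel ans menor mayor pros ((if pila ≠ [] then pila.headD false else false) :: pila) (n+1)
          else if c = "(" ∧ pvPrev E n = "(" then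
            match pila with
            | [] => ans      -- pila[-1] on empty deque: IndexError in Python (outside Pre_)
            | b :: rest => calculusGo N E fuel ans menor mayor pros (b :: b :: rest) (n+1)
          else if c = ")" then
            match pila with
            | [] => ans      -- pila.pop() on empty deque: IndexError in Python (outside Pre_)
            | _ :: rest => calculusGo N E fuel ans menor mayor pros rest (n+1)
          else calculusGo N E fuel ans menor mayor pros pila (n+1)
        else
          if c = "x" ∧ pvPrev E n = "+" then
            calculusGo N E fuel (ans - PySem.List.pyGetD N menor 0) (menor + 1) mayor (pros + 1) pila (n+1)
          else if c = "x" ∧ pvPrev E n = "-" then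
            calculusGo N E fuel (ans + PySem.List.pyGetD N mayor 0) menor (mayor - 1) (pros + 1) pila (n+1)
          else if c = "x" ∧ pvPrev E n = "(" then
            calculusGo N E fuel (ans - PySem.List.pyGetD N menor 0) (menor + 1) mayor (pros + 1) pila (n+1)
          else if c = "(" ∧ pvPrev E n = "-" then
            calculusGo N E fuel ans menor mayor pros ((if pila ≠ [] then !(pila.headD false) else false) :: pila) (n+1)
          else if c = "(" ∧ pvPrev E n = "+" then
            calculusGo N E fuel ans menor mayor pros ((if pila ≠ [] then pila.headD false else true) :: pila) (n+1)
          else if c = "(" ∧ pvPrev E n = "(" then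
            calculusGo N E fuel ans menor mayor pros (pila.headD false :: pila) (n+1)
          else if c = ")" then
            match pila with
            | [] => ans
            | _ :: rest => calculusGo N E fuel ans menor mayor pros rest (n+1)
          else calculusGo N E fuel ans menor mayor pros pila (n+1)
    else ans

def calculus (N : List Int) (E : List String) : Int :=
  calculusGo N E (E.length + 1) 0 0 ((N.length : Int) - 1) 0 [] 0

-- ===== PORT B =====
-- Source B: return sum(N[len(N)-pos:]) - sum(N[:neg])
def calculusAltRes (N : List Int) (pos neg : Int) : Int :=
  (PySem.List.slice N (some ((N.length : Int) - pos)) none).sum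
    - (PySem.List.slice N none (some neg)).sum

def calculusAltGo (N : List Int) (E : List String) : Nat → Int → Int → List Bool → Nat → Int
  | 0, pos, neg, _, _ => calculusAltRes N pos neg
  | fuel+1, pos, neg, pila, n =>
    if pos + neg < (N.length : Int) then
      match PySem.List.pyGet? E (n : Int) with
      | none => calculusAltRes N pos neg   -- E[n]: IndexError in Python (outside Pre_)
      | some c =>
        if c = "x" then
          if n = 0 then calculusAltGo N E fuel (pos + 1) neg pila (n+1)
          else if pvPrev E n = "+" ∨ pvPrev E n = "-" ∨ pvPrev E n = "(" then
            if (pvPrev E n == "-") ^^ (!pila.isEmpty && pila.headD false) then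
              calculusAltGo N E fuel pos (neg + 1) pila (n+1)
            else
              calculusAltGo N E fuel (pos + 1) neg pila (n+1)
          else calculusAltGo N E fuel pos neg pila (n+1)
        else if c = "(" then
          if n = 0 then calculusAltGo N E fuel pos neg (false :: pila) (n+1)
          else if pvPrev E n = "(" then
            match pila with
            | [] => calculusAltRes N pos neg    -- pila[-1] on empty list: IndexError in Python (outside Pre_)
            | b :: rest => calculusAltGo N E fuel pos neg (b :: b :: rest) (n+1)
          else if pvPrev E n = "+" ∨ pvPrev E n = "-" then
            calculusAltGo N E fuel pos neg
              (((pvPrev E n == "-") ^^ (!pila.isEmpty && pila.headD false)) :: pila) (n+1)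
          else calculusAltGo N E fuel pos neg pila (n+1)
        else if c = ")" then
          match pila with
          | [] => calculusAltRes N pos neg      -- pila.pop() on empty list: IndexError in Python (outside Pre_)
          | _ :: rest => calculusAltGo N E fuel pos neg rest (n+1)
        else calculusAltGo N E fuel pos neg pila (n+1)
    else calculusAltRes N pos neg

def calculus_alt (N : List Int) (E : List String) : Int :=
  calculusAltGo N E (E.length + 1) 0 0 [] 0

-- ===== PRECONDITION & SPEC =====
-- token-shape helpers for Pre_
def pvTokPair (a b : String) : Bool :=
  if a = "x" ∨ a = ")" then b = "+" ∨ b = "-" ∨ b = ")" else b = "x" ∨ b = "("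

def pvAdj : List String → Bool
  | a :: b :: r => pvTokPair a b && pvAdj (b :: r)
  | _ => true

def pvBal : List String → Int → Bool
  | [], _ => true
  | t :: r, d =>
    let d' := if t = "(" then d + 1 else if t = ")" then d - 1 else d
    decide (0 ≤ d') && pvBal r d'

def pvGoodPrefix (F : List String) (m : Nat) : Bool :=
  F.all (fun t => t = "x" ∨ t = "+" ∨ t = "-" ∨ t = "(" ∨ t = ")") &&
  (F.head? = some "x" ∨ F.head? = some "(") &&
  (F.getLast? = some "x") &&
  (F.count "x" = m) &&
  pvAdj F && pvBal F 0

-- Pre_ excludes exactly the malformed inputs: unless N = [] (A returns 0 without reading E), some prefix of E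
-- must be a well-formed +/-/parenthesis expression over 'x' whose number of 'x' equals len(N) (A stops right
-- after consuming the len(N)-th 'x'); on malformed E the scan almost always raises IndexError (E exhausted or
-- an empty-stack pop/peek), and on the rare malformed E that A scans past and still returns on (an ignored
-- token such as 'x' right after ')'), B returns the same value anyway.
def Pre_calculus (N : List Int) (E : List String) : Prop :=
  N = [] ∨ ∃ k ∈ List.range (E.length + 1), pvGoodPrefix (E.take k) N.length = true
instance (N : List Int) (E : List String) : Decidable (Pre_calculus N E) := by
  unfold Pre_calculus; infer_instance

def pvWitness_calculus : List Int × List String := ([1, 3], ["x", "-", "x"])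

def Spec_calculus (N : List Int) (E : List String) (out : Int) : Prop := out = calculus_alt N E
instance (N : List Int) (E : List String) (out : Int) : Decidable (Spec_calculus N E out) := by unfold Spec_calculus; infer_instance

-- ===== CLAIM (what is proved, stated in full; the proofs are below) =====
def Claim_equal_calculus : Prop := ∀ (N : List Int) (E : List String), Dom_calculus N E → Pre_calculus N E → Spec_calculus N E (calculus N E)

-- ===== LEMMAS AND PROOFS =====
-- sum of the last p elements / first q elements of N
def tailSum (N : List Int) (p : Nat) : Int := ((N.drop (N.length - p)).sum)
def headSum (N : List Int) (q : Nat) : Int := ((N.take q).sum)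

lemma res_eq (N : List Int) (p q : Nat) (h : p + q ≤ N.length) :
    calculusAltRes N (p : Int) (q : Int) = tailSum N p - headSum N q := by
  unfold calculusAltRes tailSum headSum
  have h1 : (0:Int) ≤ (N.length : Int) - (p : Int) := by omega
  have h2 : (0:Int) ≤ (q : Int) := by omega
  rw [PySem.List.slice_from N h1, PySem.List.slice_to N h2]
  have h3 : ((N.length : Int) - (p : Int)).toNat = N.length - p := by omega
  have h4 : ((q : Int)).toNat = q := by omega
  rw [h3, h4]

lemma tail_step (N : List Int) (p : Nat) (h : p < N.length) :
    tailSum N (p + 1) = PySem.List.pyGetD N ((N.length : Int) - 1 - (p : Int)) 0 + tailSum N p := by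
  unfold tailSum
  have h0 : (0:Int) ≤ (N.length : Int) - 1 - (p : Int) := by omega
  have h1 : ((N.length : Int) - 1 - (p : Int)) < (N.length : Int) := by omega
  rw [PySem.List.pyGetD_eq_getElem N 0 h0 h1]
  rw [List.drop_eq_getElem_cons (show N.length - (p + 1) < N.length by omega)]
  rw [List.sum_cons]
  simp only [show ((N.length : Int) - 1 - (p : Int)).toNat = N.length - (p+1) from by omega,
             show N.length - (p + 1) + 1 = N.length - p from by omega]

lemma head_step (N : List Int) (q : Nat) (h : q < N.length) :
    headSum N (q + 1) = headSum N q + PySem.List.pyGetD N (q : Int) 0 := by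
  unfold headSum
  rw [List.take_add_one, List.sum_append, PySem.List.pyGetD_natCast,
      List.getElem?_eq_getElem h]
  simp [List.getD_eq_getElem?_getD, List.getElem?_eq_getElem h]

lemma go_eq (N : List Int) (E : List String) :
    ∀ (fuel : Nat) (p q : Nat) (ans menor mayor pros pos neg : Int) (pila : List Bool) (n : Nat),
    p + q ≤ N.length → (n = 0 → p = 0 ∧ q = 0) →
    ans = tailSum N p - headSum N q → menor = (q : Int) →
    mayor = (N.length : Int) - 1 - (p : Int) → pros = (p : Int) + (q : Int) →
    pos = (p : Int) → neg = (q : Int) →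
    calculusGo N E fuel ans menor mayor pros pila n = calculusAltGo N E fuel pos neg pila n := by
  intro fuel
  induction fuel with
  | zero =>
    intro p q ans menor mayor pros pos neg pila n h h0 ha hm hM hp hpos hneg
    subst ha hm hM hp hpos hneg
    exact (res_eq N p q h).symm
  | succ f ih =>
    intro p q ans menor mayor pros pos neg pila n h h0 ha hm hM hp hpos hneg
    subst ha hm hM hp hpos hneg
    by_cases hg : p + q < N.length
    · simp only [calculusGo, calculusAltGo]
      rw [if_pos (show ((p:Int) + (q:Int)) ≤ (N.length:Int) - 1 by omega),
          if_pos (show ((p:Int) + (q:Int)) < (N.length:Int) by omega)]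
      rcases PySem.List.pyGet? E ((n:Nat):Int) with _ | c
      · exact (res_eq N p q h).symm
      · rcases n with _ | m
        · -- n = 0
          obtain ⟨hp0, hq0⟩ := h0 rfl
          subst hp0; subst hq0
          by_cases hc : c = "x"
          · subst hc
            exact ih (0+1) 0 _ _ _ _ _ _ _ _ (by omega) (fun hh => absurd hh (by omega))
              (by rw [tail_step N 0 (by omega)]; simp [tailSum, headSum]) rfl
              (by push_cast; try ring) (by push_cast; try ring) (by push_cast; try ring) rfl
          · by_cases hcp : c = "("
            · subst hcp
              exact ih 0 0 _ _ _ _ _ _ _ _ h (fun hh => absurd hh (by omega)) rfl rfl rfl rfl rfl rfl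
            · by_cases hcr : c = ")"
              · subst hcr
                rcases pila with _ | ⟨b, rest⟩
                · exact (res_eq N 0 0 h).symm
                · cases b
                  · exact ih 0 0 _ _ _ _ _ _ _ _ h (fun hh => absurd hh (by omega)) rfl rfl rfl rfl rfl rfl
                  · exact ih 0 0 _ _ _ _ _ _ _ _ h (fun hh => absurd hh (by omega)) rfl rfl rfl rfl rfl rfl
              · simp only [eq_false hc, eq_false hcp, eq_false hcr, false_and, and_false,
                  if_false, ite_self]
                exact ih 0 0 _ _ _ _ _ _ _ _ h (fun hh => absurd hh (by omega)) rfl rfl rfl rfl rfl rfl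
        · -- n = m + 1
          by_cases hc : c = "x"
          · subst hc
            by_cases hP1 : pvPrev E (m+1) = "+"
            · simp only [hP1]
              rcases pila with _ | ⟨b, rest⟩
              · exact ih (p+1) q _ _ _ _ _ _ _ _ (by omega) (fun hh => absurd hh (by omega))
                  (by rw [tail_step N p (by omega)]; ring) rfl
                  (by push_cast; try ring) (by push_cast; try ring) (by push_cast; try ring) rfl
              · cases b
                · exact ih (p+1) q _ _ _ _ _ _ _ _ (by omega) (fun hh => absurd hh (by omega))
                    (by rw [tail_step N p (by omega)]; ring) rfl
                    (by push_cast; try ring) (by push_cast; try ring) (by push_cast; try ring) rfl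
                · exact ih p (q+1) _ _ _ _ _ _ _ _ (by omega) (fun hh => absurd hh (by omega))
                    (by rw [head_step N q (by omega)]; ring) (by push_cast; try ring) rfl
                    (by push_cast; try ring) rfl (by push_cast; try ring)
            · by_cases hP2 : pvPrev E (m+1) = "-"
              · simp only [hP2]
                rcases pila with _ | ⟨b, rest⟩
                · exact ih p (q+1) _ _ _ _ _ _ _ _ (by omega) (fun hh => absurd hh (by omega))
                    (by rw [head_step N q (by omega)]; ring) (by push_cast; try ring) rfl
                    (by push_cast; try ring) rfl (by push_cast; try ring)
                · cases b
                  · exact ih p (q+1) _ _ _ _ _ _ _ _ (by omega) (fun hh => absurd hh (by omega))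
                      (by rw [head_step N q (by omega)]; ring) (by push_cast; try ring) rfl
                      (by push_cast; try ring) rfl (by push_cast; try ring)
                  · exact ih (p+1) q _ _ _ _ _ _ _ _ (by omega) (fun hh => absurd hh (by omega))
                      (by rw [tail_step N p (by omega)]; ring) rfl
                      (by push_cast; try ring) (by push_cast; try ring) (by push_cast; try ring) rfl
              · by_cases hP3 : pvPrev E (m+1) = "("
                · simp only [hP3]
                  rcases pila with _ | ⟨b, rest⟩
                  · exact ih (p+1) q _ _ _ _ _ _ _ _ (by omega) (fun hh => absurd hh (by omega))
                      (by rw [tail_step N p (by omega)]; ring) rfl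
                      (by push_cast; try ring) (by push_cast; try ring) (by push_cast; try ring) rfl
                  · cases b
                    · exact ih (p+1) q _ _ _ _ _ _ _ _ (by omega) (fun hh => absurd hh (by omega))
                        (by rw [tail_step N p (by omega)]; ring) rfl
                        (by push_cast; try ring) (by push_cast; try ring) (by push_cast; try ring) rfl
                    · exact ih p (q+1) _ _ _ _ _ _ _ _ (by omega) (fun hh => absurd hh (by omega))
                        (by rw [head_step N q (by omega)]; ring) (by push_cast; try ring) rfl
                        (by push_cast; try ring) rfl (by push_cast; try ring)
                · simp only [eq_false hP1, eq_false hP2, eq_false hP3, and_false, if_false,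
                    or_false, ite_self]
                  rcases pila with _ | ⟨b, rest⟩
                  · exact ih p q _ _ _ _ _ _ _ _ h (fun hh => absurd hh (by omega)) rfl rfl rfl rfl rfl rfl
                  · cases b
                    · exact ih p q _ _ _ _ _ _ _ _ h (fun hh => absurd hh (by omega)) rfl rfl rfl rfl rfl rfl
                    · exact ih p q _ _ _ _ _ _ _ _ h (fun hh => absurd hh (by omega)) rfl rfl rfl rfl rfl rfl
          · by_cases hcp : c = "("
            · subst hcp
              by_cases hP1 : pvPrev E (m+1) = "+"
              · simp only [hP1]
                rcases pila with _ | ⟨b, rest⟩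
                · exact ih p q _ _ _ _ _ _ _ _ h (fun hh => absurd hh (by omega)) rfl rfl rfl rfl rfl rfl
                · cases b
                  · exact ih p q _ _ _ _ _ _ _ _ h (fun hh => absurd hh (by omega)) rfl rfl rfl rfl rfl rfl
                  · exact ih p q _ _ _ _ _ _ _ _ h (fun hh => absurd hh (by omega)) rfl rfl rfl rfl rfl rfl
              · by_cases hP2 : pvPrev E (m+1) = "-"
                · simp only [hP2]
                  rcases pila with _ | ⟨b, rest⟩
                  · exact ih p q _ _ _ _ _ _ _ _ h (fun hh => absurd hh (by omega)) rfl rfl rfl rfl rfl rfl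
                  · cases b
                    · exact ih p q _ _ _ _ _ _ _ _ h (fun hh => absurd hh (by omega)) rfl rfl rfl rfl rfl rfl
                    · exact ih p q _ _ _ _ _ _ _ _ h (fun hh => absurd hh (by omega)) rfl rfl rfl rfl rfl rfl
                · by_cases hP3 : pvPrev E (m+1) = "("
                  · simp only [hP3]
                    rcases pila with _ | ⟨b, rest⟩
                    · exact (res_eq N p q h).symm
                    · cases b
                      · exact ih p q _ _ _ _ _ _ _ _ h (fun hh => absurd hh (by omega)) rfl rfl rfl rfl rfl rfl
                      · exact ih p q _ _ _ _ _ _ _ _ h (fun hh => absurd hh (by omega)) rfl rfl rfl rfl rfl rfl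
                  · simp only [eq_false hP1, eq_false hP2, eq_false hP3, and_false, if_false,
                      or_false, ite_self]
                    rcases pila with _ | ⟨b, rest⟩
                    · exact ih p q _ _ _ _ _ _ _ _ h (fun hh => absurd hh (by omega)) rfl rfl rfl rfl rfl rfl
                    · cases b
                      · exact ih p q _ _ _ _ _ _ _ _ h (fun hh => absurd hh (by omega)) rfl rfl rfl rfl rfl rfl
                      · exact ih p q _ _ _ _ _ _ _ _ h (fun hh => absurd hh (by omega)) rfl rfl rfl rfl rfl rfl
            · by_cases hcr : c = ")"
              · subst hcr
                rcases pila with _ | ⟨b, rest⟩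
                · exact (res_eq N p q h).symm
                · cases b
                  · exact ih p q _ _ _ _ _ _ _ _ h (fun hh => absurd hh (by omega)) rfl rfl rfl rfl rfl rfl
                  · exact ih p q _ _ _ _ _ _ _ _ h (fun hh => absurd hh (by omega)) rfl rfl rfl rfl rfl rfl
              · simp only [eq_false hc, eq_false hcp, eq_false hcr, false_and, and_false,
                  if_false, ite_self]
                exact ih p q _ _ _ _ _ _ _ _ h (fun hh => absurd hh (by omega)) rfl rfl rfl rfl rfl rfl
    · simp only [calculusGo, calculusAltGo]
      rw [if_neg (show ¬(((p:Int) + (q:Int)) ≤ (N.length:Int) - 1) by omega),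
          if_neg (show ¬(((p:Int) + (q:Int)) < (N.length:Int)) by omega)]
      exact (res_eq N p q h).symm

-- ===== VERDICT (by name: the statement is the Claim_ definition above) =====
theorem calculus_spec : Claim_equal_calculus := by
  intro N E _ _
  show calculus N E = calculus_alt N E
  unfold calculus calculus_alt
  exact go_eq N E (E.length + 1) 0 0 0 0 ((N.length : Int) - 1) 0 0 0 [] 0
    (by omega) (fun _ => ⟨rfl, rfl⟩)
    (by simp [tailSum, headSum]) (by simp) (by simp) (by simp) (by simp) (by simp)
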